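-- pv_equiv track=rewrite | github.com/stsmall/abc_scripts2 | project/stat_modules/blocksfs.py | bSFSconfig
-- ===== SOURCE A (Python) =====
-- from collections import Counter
--
-- def bSFSconfig(mutl, comb):
--     if mutl == []:
--         jSFS = []
--     else:
--         ali = list(zip(*mutl))
--         ali1 = [map(int, ali[i]) for i in comb]
--     # freq of '1' (which may be a true or arbitrary polarization) in each pop sample:
--         count1 = [sum(i) for i in list(zip(*ali1))]
--         jSFS = count1
--     return Counter(jSFS)
-- ===== SOURCE B (Python) =====
-- from collections import Counter
--
-- def bSFSconfig(mutl, comb):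
--     if not mutl or not comb:
--         return Counter()
--     return Counter(sum(int(row[c]) for c in comb) for row in mutl)
-- ===== Notes on version B (the rewrite author's own statement) =====
-- stated objective: simpler
-- what changed: B removes both zip(*...) transposes and counts, row by row, the sum of int(row[c]) over the selected columns; Pre_ excludes inputs where A raises (a column index outside the zip-truncated range, or an unparsable cell) and, as a defensible-corner artefact, negative column indices on ragged mutl, where A's resolution of the index against the shortest row is an accident of zip truncation while B resolves it against each row's own length.
-- outside the precondition, e.g. on bSFSconfig([['1', '0'], ['1']], [-1]): A returns {1: 2}, B returns {0: 1, 1: 1}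
import Mathlib
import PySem

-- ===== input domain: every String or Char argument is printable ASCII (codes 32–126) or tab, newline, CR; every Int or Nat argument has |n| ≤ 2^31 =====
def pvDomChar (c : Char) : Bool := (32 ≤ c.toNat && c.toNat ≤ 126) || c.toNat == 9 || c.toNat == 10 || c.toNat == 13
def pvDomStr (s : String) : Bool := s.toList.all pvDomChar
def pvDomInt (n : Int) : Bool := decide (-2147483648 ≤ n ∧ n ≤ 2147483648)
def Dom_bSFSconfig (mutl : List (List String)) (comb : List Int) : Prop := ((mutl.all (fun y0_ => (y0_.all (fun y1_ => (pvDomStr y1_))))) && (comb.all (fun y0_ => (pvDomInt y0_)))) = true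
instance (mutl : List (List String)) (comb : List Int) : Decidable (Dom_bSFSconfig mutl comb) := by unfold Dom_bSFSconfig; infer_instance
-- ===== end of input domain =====

-- B drops A's double zip(*…) transpose and counts per-row sums directly (simpler decomposition; same asymptotic cost).


-- ===== PORT A =====
-- zip(*xss): Python's zip over the unpacked lists — truncates to the shortest list; exact, hand-written (PySem has no n-ary zip).
def pyZipStar {α : Type} (d : α) (xss : List (List α)) : List (List α) :=
  if h : xss.isEmpty || xss.any (·.isEmpty) then []
  else (xss.map (fun l => l.headD d)) :: pyZipStar d (xss.map (·.tail))
termination_by (xss.headD []).length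
decreasing_by
  match xss with
  | [] => simp at h
  | x :: t =>
    simp only [List.isEmpty_cons, List.any_cons, Bool.or_eq_true, List.isEmpty_iff] at h
    push_neg at h
    cases x with
    | nil => simp at h
    | cons a l => simp [List.headD]

def bSFSconfig (mutl : List (List String)) (comb : List Int) : List (Int × Int) :=
  let jSFS : List Int :=
    if mutl = [] then []
    else
      let ali := pyZipStar "" mutl
      let ali1 : List (List Int) := comb.map (fun i =>
        ((PySem.List.pyGet? ali i).getD []).map (fun s => (PySem.Int.ofStr? s).getD 0))
      (pyZipStar 0 ali1).map (fun r => r.sum)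
  (PySem.Dict.counter jSFS).items

-- ===== PORT B =====
def bSFSconfig_alt (mutl : List (List String)) (comb : List Int) : List (Int × Int) :=
  if mutl = [] ∨ comb = [] then (PySem.Dict.empty : PySem.Dict Int Int).items
  else
    let sums : List Int := mutl.map (fun row =>
      (comb.map (fun c =>
        ((PySem.List.pyGet? row c).bind PySem.Int.ofStr?).getD 0)).sum)
    (PySem.Dict.counter sums).items

-- ===== PRECONDITION & SPEC =====
-- length of the shortest row (0 for no rows) — the number of columns zip(*mutl) keeps
def pvMinL {α : Type} (xss : List (List α)) : Nat :=
  match xss with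
  | [] => 0
  | [x] => x.length
  | x :: xs => min x.length (pvMinL xs)

-- Pre_ excludes the inputs where Python A raises — an index of comb outside the
-- (negative-index-aware) range of zip(*mutl)'s columns (IndexError), or an accessed cell whose
-- string is not int()-parsable (ValueError) — and, as a defensible-corner artefact, negative
-- column indices on RAGGED mutl, where A happens to resolve the index against the shortest row
-- (an accident of zip truncation) while B resolves it against each row's own length.
def Pre_bSFSconfig (mutl : List (List String)) (comb : List Int) : Prop :=
  mutl = [] ∨ comb = [] ∨
  (∀ c ∈ comb, (-(pvMinL mutl : Int) ≤ c ∧ c < (pvMinL mutl : Int)) ∧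
    (c < 0 → ∀ row ∈ mutl, row.length = pvMinL mutl) ∧
    ∀ row ∈ mutl,
      PySem.Int.ofStr? (row.getD (if 0 ≤ c then c else c + (pvMinL mutl : Int)).toNat "") ≠ none)
instance (mutl : List (List String)) (comb : List Int) : Decidable (Pre_bSFSconfig mutl comb) := by
  unfold Pre_bSFSconfig; infer_instance

def pvWitness_bSFSconfig : List (List String) × List Int :=
  ([["1", "0", "1"], ["0", "1", "1"]], [0, -1])

def Spec_bSFSconfig (mutl : List (List String)) (comb : List Int) (out : List (Int × Int)) : Prop := out = bSFSconfig_alt mutl comb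
instance (mutl : List (List String)) (comb : List Int) (out : List (Int × Int)) : Decidable (Spec_bSFSconfig mutl comb out) := by unfold Spec_bSFSconfig; infer_instance

-- ===== CLAIM (what is proved, stated in full; the proofs are below) =====
def Claim_equal_bSFSconfig : Prop := ∀ (mutl : List (List String)) (comb : List Int), Dom_bSFSconfig mutl comb → Pre_bSFSconfig mutl comb → Spec_bSFSconfig mutl comb (bSFSconfig mutl comb)

-- ===== LEMMAS AND PROOFS =====

theorem pvMinL_eq_zero_of_mem_nil {a : Type} (xss : List (List a)) (h : [] ∈ xss) :
    pvMinL xss = 0 := by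
  induction xss with
  | nil => simp at h
  | cons x t ih =>
    cases t with
    | nil => simp at h; simp [pvMinL, h]
    | cons y s =>
      rcases List.mem_cons.mp h with h | h
      · simp [pvMinL, ← h]
      · have := ih h
        simp [pvMinL, this]

theorem pvMinL_tail_map {a : Type} (xss : List (List a)) (hne : xss ≠ [])
    (hall : [] ∉ xss) :
    pvMinL (xss.map (·.tail)) + 1 = pvMinL xss := by
  induction xss with
  | nil => exact absurd rfl hne
  | cons x t ih =>
    simp only [List.mem_cons, not_or] at hall
    obtain ⟨hx, ht⟩ := hall
    cases t with
    | nil =>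
      cases x with
      | nil => exact absurd rfl (fun e => hx e.symm)
      | cons c l => simp [pvMinL]
    | cons y s =>
      have ihs := ih (by simp) ht
      have hxl : x.tail.length + 1 = x.length := by
        cases x with
        | nil => exact absurd rfl (fun e => hx e.symm)
        | cons c l => simp
      simp only [List.map_cons, pvMinL] at ihs ⊢
      omega

theorem pyZipStar_eq {a : Type} (d : a) (xss : List (List a)) :
    pyZipStar d xss = (List.range (pvMinL xss)).map (fun j => xss.map (fun l => l.getD j d)) := by
  generalize hn : pvMinL xss = n
  induction n generalizing xss with
  | zero =>
    rw [pyZipStar]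
    simp only [List.range_zero, List.map_nil]
    split
    · rfl
    · rename_i h
      simp only [Bool.or_eq_true, List.isEmpty_iff, List.any_eq_true, not_or, not_exists] at h
      push_neg at h
      obtain ⟨hne, hall⟩ := h
      have hnin : [] ∉ xss := fun hmem => by
        have := hall [] hmem; simp at this
      have := pvMinL_tail_map xss hne hnin
      omega
  | succ k ih =>
    rw [pyZipStar]
    split
    · rename_i h
      simp only [Bool.or_eq_true, List.isEmpty_iff, List.any_eq_true] at h
      rcases h with h | ⟨l, hl, he⟩
      · subst h; simp [pvMinL] at hn
      · have hl' : l = [] := by simpa using he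
        subst hl'
        have := pvMinL_eq_zero_of_mem_nil xss hl; omega
    · rename_i h
      simp only [Bool.or_eq_true, List.isEmpty_iff, List.any_eq_true] at h
      push_neg at h
      obtain ⟨hne, hall⟩ := h
      have hnin : [] ∉ xss := fun hmem => by
        have := hall [] hmem; simp at this
      have htail : pvMinL (xss.map (·.tail)) = k := by
        have := pvMinL_tail_map xss hne hnin
        omega
      rw [ih _ htail]
      rw [List.range_succ_eq_map]
      simp only [List.map_cons, List.map_map]
      congr 1
      · apply List.map_congr_left
        intro l _; cases l <;> rfl
      · apply List.map_congr_left
        intro j _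
        simp only [Function.comp_def]
        apply List.map_congr_left
        intro l _; cases l <;> rfl

theorem pvMinL_const {a : Type} (xss : List (List a)) (n : Nat) (hne : xss ≠ [])
    (h : ∀ l ∈ xss, l.length = n) : pvMinL xss = n := by
  induction xss with
  | nil => exact absurd rfl hne
  | cons x t ih =>
    cases t with
    | nil => simpa [pvMinL] using h x (by simp)
    | cons y s =>
      have := ih (by simp) (fun l hl => h l (List.mem_cons_of_mem _ hl))
      have hx := h x (by simp)
      simp [pvMinL, this, hx]

theorem pvMinL_le {a : Type} (xss : List (List a)) (l : List a) (hl : l ∈ xss) :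
    pvMinL xss ≤ l.length := by
  induction xss with
  | nil => simp at hl
  | cons x t ih =>
    cases t with
    | nil => simp at hl; simp [pvMinL, hl]
    | cons y s =>
      rw [show pvMinL (x :: y :: s) = min x.length (pvMinL (y :: s)) from rfl]
      rcases List.mem_cons.mp hl with h | h
      · rw [h]; exact min_le_left _ _
      · exact le_trans (min_le_right _ _) (ih h)

-- the column zip(*mutl)[c] (negative-index aware) is the c-th entry of every row
theorem pvCol (mutl : List (List String)) (c : Int)
    (h1 : -(pvMinL mutl : Int) ≤ c) (h2 : c < (pvMinL mutl : Int)) :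
    PySem.List.pyGet? (pyZipStar "" mutl) c
      = some (mutl.map (fun l => l.getD ((if 0 ≤ c then c else c + (pvMinL mutl : Int)).toNat) "")) := by
  rw [pyZipStar_eq]
  by_cases hc : 0 ≤ c
  · rw [if_pos hc, PySem.List.pyGet?_of_nonneg _ hc]
    have hk : c.toNat < pvMinL mutl := by omega
    rw [List.getElem?_map, List.getElem?_range hk]
    simp only [Option.map_some]
  · have hkpos : 0 < (-c).toNat := by omega
    have hkle : (-c).toNat ≤ ((List.range (pvMinL mutl)).map
        (fun j => mutl.map (fun l => l.getD j ""))).length := by simp; omega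
    have hc' : c = -(((-c).toNat : Nat) : Int) := by omega
    rw [if_neg hc, hc', PySem.List.pyGet?_neg_natCast _ _ hkpos hkle]
    simp only [List.length_map, List.length_range]
    have hidx : pvMinL mutl - (-c).toNat < pvMinL mutl := by omega
    rw [List.getElem?_map, List.getElem?_range hidx]
    simp only [Option.map_some, Option.some.injEq]
    have heq : ((-(((-c).toNat : Nat) : Int)) + (pvMinL mutl : Int)).toNat
        = pvMinL mutl - (-c).toNat := by omega
    rw [heq]

-- A's list of per-row sums equals B's, under Pre_ (nonempty case)
theorem pvMain (mutl : List (List String)) (comb : List Int)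
    (hc : comb ≠ [])
    (hp : ∀ c ∈ comb, -(pvMinL mutl : Int) ≤ c ∧ c < (pvMinL mutl : Int))
    (hr : ∀ c ∈ comb, c < 0 → ∀ row ∈ mutl, row.length = pvMinL mutl) :
    ((pyZipStar 0 (comb.map (fun i =>
        ((PySem.List.pyGet? (pyZipStar "" mutl) i).getD []).map
          (fun s => (PySem.Int.ofStr? s).getD 0)))).map (fun r => r.sum))
      = mutl.map (fun row =>
          (comb.map (fun c =>
            ((PySem.List.pyGet? row c).bind PySem.Int.ofStr?).getD 0)).sum) := by
  have hcol : ∀ c ∈ comb,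
      ((PySem.List.pyGet? (pyZipStar "" mutl) c).getD []).map (fun s => (PySem.Int.ofStr? s).getD 0)
        = mutl.map (fun l =>
            (PySem.Int.ofStr? (l.getD ((if 0 ≤ c then c else c + (pvMinL mutl : Int)).toNat) "")).getD 0) := by
    intro c hcmem
    obtain ⟨hb1, hb2⟩ := hp c hcmem
    rw [pvCol mutl c hb1 hb2]
    simp [List.map_map]
  rw [List.map_congr_left hcol]
  have hne' : (comb.map (fun c => mutl.map (fun l =>
      (PySem.Int.ofStr? (l.getD ((if 0 ≤ c then c else c + (pvMinL mutl : Int)).toNat) "")).getD 0))) ≠ [] := by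
    simp [hc]
  have hconst : ∀ l ∈ (comb.map (fun c => mutl.map (fun l =>
      (PySem.Int.ofStr? (l.getD ((if 0 ≤ c then c else c + (pvMinL mutl : Int)).toNat) "")).getD 0))),
      l.length = mutl.length := by
    intro l hl
    obtain ⟨c, _, rfl⟩ := List.mem_map.mp hl
    simp
  rw [pyZipStar_eq, pvMinL_const _ mutl.length hne' hconst, List.map_map]
  apply List.ext_getElem
  · simp
  intro j h1j h2j
  simp only [List.getElem_map, List.getElem_range, Function.comp_apply, List.map_map]
  congr 1
  apply List.map_congr_left
  intro c hcmem
  obtain ⟨hb1, hb2⟩ := hp c hcmem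
  have hjlt : j < mutl.length := by simpa using h1j
  simp only [Function.comp_apply]
  rw [List.getD_eq_getElem?_getD, List.getElem?_map, List.getElem?_eq_getElem hjlt]
  simp only [Option.map_some, Option.getD_some]
  have hrow : pvMinL mutl ≤ mutl[j].length := pvMinL_le mutl _ (List.getElem_mem hjlt)
  by_cases hc0 : 0 ≤ c
  · have hlt : c.toNat < mutl[j].length := by omega
    rw [if_pos hc0, PySem.List.pyGet?_of_nonneg _ hc0, List.getElem?_eq_getElem hlt]
    simp [List.getD_eq_getElem?_getD, List.getElem?_eq_getElem hlt]
  · have hlen : mutl[j].length = pvMinL mutl :=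
      hr c hcmem (by omega) _ (List.getElem_mem hjlt)
    have hkpos : 0 < (-c).toNat := by omega
    have hkle : (-c).toNat ≤ mutl[j].length := by omega
    have hc' : c = -(((-c).toNat : Nat) : Int) := by omega
    rw [if_neg hc0, hc', PySem.List.pyGet?_neg_natCast _ _ hkpos hkle]
    have hidx : mutl[j].length - (-c).toNat < mutl[j].length := by omega
    rw [List.getElem?_eq_getElem hidx]
    have heq : ((-(((-c).toNat : Nat) : Int)) + (pvMinL mutl : Int)).toNat
        = mutl[j].length - (-c).toNat := by omega
    rw [heq]
    simp [List.getD_eq_getElem?_getD, List.getElem?_eq_getElem hidx]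

-- ===== VERDICT (by name: the statement is the Claim_ definition above) =====
theorem bSFSconfig_spec : Claim_equal_bSFSconfig := by
  intro mutl comb _hdom hpre
  unfold Spec_bSFSconfig bSFSconfig bSFSconfig_alt
  rcases eq_or_ne mutl [] with hm | hm
  · subst hm
    rfl
  · rcases eq_or_ne comb [] with hcq | hcq
    · subst hcq
      rw [if_neg hm, if_pos (Or.inr rfl)]
      simp only [List.map_nil]
      have hz : pyZipStar (0 : Int) [] = [] := by rw [pyZipStar]; simp
      rw [hz]
      rfl
    · rw [if_neg hm, if_neg (by simp [hm, hcq])]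
      have hall : ∀ c ∈ comb, (-(pvMinL mutl : Int) ≤ c ∧ c < (pvMinL mutl : Int)) ∧
          (c < 0 → ∀ row ∈ mutl, row.length = pvMinL mutl) := by
        rcases hpre with h | h | h
        · exact absurd h hm
        · exact absurd h hcq
        · exact fun c hc => ⟨(h c hc).1, (h c hc).2.1⟩
      have := pvMain mutl comb hcq (fun c hc => (hall c hc).1) (fun c hc => (hall c hc).2)
      rw [this]
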